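-- pv_equiv track=rewrite | github.com/ThisIsDNa/Resume_Refining_and_Tailoring | backend/app/services/refinery_transform.py | _pick_target_bullet
-- ===== SOURCE A (Python) =====
-- from typing import Any, Dict, List, Optional, Set, Tuple
--
-- def _bullet_keyword_hits(keywords: Tuple[str, ...], bullet_lower: str) -> int:
--     n = 0
--     for kw in keywords:
--         k = kw.strip().lower()
--         if len(k) < 2:
--             continue
--         if k in bullet_lower:
--             n += 1
--     return n
--
-- def _pick_target_bullet(
--     keywords: Tuple[str, ...], targets: List[Tuple[str, int, int, str]]
-- ) -> Optional[Tuple[str, int, int, str]]: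
--     if not targets:
--         return None
--     kws = sorted(keywords, key=lambda x: -len(x.strip()))
--     scored: List[Tuple[int, Tuple[int, int, int], str, int, int, str]] = []
--     for kind, ei, bi, text in targets:
--         low = text.lower()
--         hits = _bullet_keyword_hits(tuple(kws), low)
--         kind_pri = (0 if kind == "experience" else 1, ei, bi)
--         scored.append((hits, kind_pri, kind, ei, bi, text))
--     positive = [x for x in scored if x[0] > 0]
--     if positive:
--         # Thinnest grounded line first (fewest keyword hits), then experience, stable order.
--         positive.sort(key=lambda x: (x[0], x[1]))
--         _, _, kind, ei, bi, text = positive[0]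
--         return (kind, ei, bi, text)
--     scored.sort(key=lambda x: x[1])
--     _, _, kind, ei, bi, text = scored[0]
--     return (kind, ei, bi, text)
-- ===== SOURCE B (Python) =====
-- from typing import List, Optional, Tuple
--
-- def _bullet_keyword_hits(keywords: Tuple[str, ...], bullet_lower: str) -> int:
--     n = 0
--     for kw in keywords:
--         k = kw.strip().lower()
--         if len(k) < 2:
--             continue
--         if k in bullet_lower:
--             n += 1
--     return n
--
-- def _pick_target_bullet(
--     keywords: Tuple[str, ...], targets: List[Tuple[str, int, int, str]]
-- ) -> Optional[Tuple[str, int, int, str]]: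
--     if not targets:
--         return None
--     best = None  # (key, target); first minimum wins
--     for kind, ei, bi, text in targets:
--         hits = _bullet_keyword_hits(keywords, text.lower())
--         key = (hits == 0, hits, 0 if kind == "experience" else 1, ei, bi)
--         if best is None or key < best[0]:
--             best = (key, (kind, ei, bi, text))
--     return best[1]
-- ===== Notes on version B (the rewrite author's own statement) =====
-- stated objective: simpler
-- what changed: Replaces the scored-list build, positive filter and two stable sorts with a single pass that keeps the first target minimal under the unified key (hits==0, hits, kind!=experience, ei, bi).
import Mathlib
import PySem

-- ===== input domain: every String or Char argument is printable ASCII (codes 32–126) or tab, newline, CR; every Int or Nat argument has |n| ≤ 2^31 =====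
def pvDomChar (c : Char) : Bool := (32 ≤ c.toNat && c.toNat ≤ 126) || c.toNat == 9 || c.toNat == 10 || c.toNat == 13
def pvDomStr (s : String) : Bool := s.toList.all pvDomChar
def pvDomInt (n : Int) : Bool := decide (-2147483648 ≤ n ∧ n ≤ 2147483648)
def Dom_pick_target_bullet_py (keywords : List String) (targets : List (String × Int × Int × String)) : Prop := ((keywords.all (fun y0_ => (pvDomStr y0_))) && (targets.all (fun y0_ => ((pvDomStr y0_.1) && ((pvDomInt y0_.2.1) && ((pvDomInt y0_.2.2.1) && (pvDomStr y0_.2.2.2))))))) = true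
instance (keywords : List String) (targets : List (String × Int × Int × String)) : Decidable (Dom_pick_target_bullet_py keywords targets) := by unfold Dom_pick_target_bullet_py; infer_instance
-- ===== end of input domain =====

-- ===== PORT A =====
-- B replaces A's scored-list build, positive filter and two stable sorts by a single pass keeping
-- the first target minimal under the unified key (hits==0, hits, kind!="experience", ei, bi); objective: simpler.

-- _bullet_keyword_hits (identical helper in both Source A and Source B; both ports call it)
def bullet_keyword_hits (keywords : List String) (bullet_lower : String) : Int :=
  keywords.foldl (fun n kw =>
    let k := PySem.Str.lower (PySem.Str.strip kw)
    if PySem.Str.len k < 2 then n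
    else if PySem.Str.isIn k bullet_lower then n + 1 else n) 0

-- Python lexicographic '<' on A's int sort keys (a 3-tuple, and a pair (hits, 3-tuple))
def pvLt3 (a b : Int × Int × Int) : Bool :=
  decide (a.1 < b.1) || (a.1 == b.1 && (decide (a.2.1 < b.2.1) || (a.2.1 == b.2.1 && decide (a.2.2 < b.2.2))))

def pvLt4 (a b : Int × Int × Int × Int) : Bool :=
  decide (a.1 < b.1) || (a.1 == b.1 && pvLt3 a.2 b.2)

-- A's two 'list.sort(key=...)' calls are Python's stable sort: PySem models sorted(xs, key)
-- exactly as this insertBy fold (PySem.List.sorted_eq_foldl_insertBy); the keys here are lex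
-- tuples, so the 'before' test is the explicit lexicographic '<' above.
def pick_target_bullet_py (keywords : List String) (targets : List (String × Int × Int × String)) : Option (String × Int × Int × String) :=
  if targets.isEmpty then none
  else
    let kws := PySem.List.sorted keywords (fun x => -(PySem.Str.len (PySem.Str.strip x))) false
    let scored := targets.map (fun t =>
      let low := PySem.Str.lower t.2.2.2
      let hits := bullet_keyword_hits kws low
      let kind_pri : Int × Int × Int := ((if t.1 = "experience" then 0 else 1), t.2.1, t.2.2.1)
      (hits, kind_pri, t))
    let positive := scored.filter (fun x => decide (0 < x.1))
    if !positive.isEmpty then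
      let sortedPos := positive.foldl
        (fun acc x => PySem.List.insertBy (fun a b => pvLt4 (a.1, a.2.1) (b.1, b.2.1)) x acc) []
      match sortedPos with
      | [] => none  -- unreachable (positive is nonempty); totalization only
      | x :: _ => some x.2.2
    else
      let sortedAll := scored.foldl
        (fun acc x => PySem.List.insertBy (fun a b => pvLt3 a.2.1 b.2.1) x acc) []
      match sortedAll with
      | [] => none  -- unreachable (targets is nonempty); totalization only
      | x :: _ => some x.2.2

-- ===== PORT B =====
-- Python '<' on B's 5-tuple key (a bool compares as the int 0/1, so the flag is an Int here)
def pvKeyLt (a b : Int × Int × Int × Int × Int) : Bool :=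
  decide (a.1 < b.1) || (a.1 == b.1 &&
    (decide (a.2.1 < b.2.1) || (a.2.1 == b.2.1 &&
      (decide (a.2.2.1 < b.2.2.1) || (a.2.2.1 == b.2.2.1 &&
        (decide (a.2.2.2.1 < b.2.2.2.1) || (a.2.2.2.1 == b.2.2.2.1 && decide (a.2.2.2.2 < b.2.2.2.2))))))))

def pick_target_bullet_py_alt (keywords : List String) (targets : List (String × Int × Int × String)) : Option (String × Int × Int × String) :=
  if targets.isEmpty then none
  else
    let best := targets.foldl
      (fun (best : Option ((Int × Int × Int × Int × Int) × (String × Int × Int × String))) t =>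
        let hits := bullet_keyword_hits keywords (PySem.Str.lower t.2.2.2)
        let key : Int × Int × Int × Int × Int :=
          ((if hits == 0 then 1 else 0), hits, (if t.1 = "experience" then 0 else 1), t.2.1, t.2.2.1)
        match best with
        | none => some (key, t)
        | some b => if pvKeyLt key b.1 then some (key, t) else some b)
      none
    best.map (·.2)

-- ===== PRECONDITION & SPEC =====
def Spec_pick_target_bullet_py (keywords : List String) (targets : List (String × Int × Int × String)) (out : Option (String × Int × Int × String)) : Prop := out = pick_target_bullet_py_alt keywords targets
instance (keywords : List String) (targets : List (String × Int × Int × String)) (out : Option (String × Int × Int × String)) : Decidable (Spec_pick_target_bullet_py keywords targets out) := by unfold Spec_pick_target_bullet_py; infer_instance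

-- ===== CLAIM =====
def Claim_equal_pick_target_bullet_py : Prop := ∀ (keywords : List String) (targets : List (String × Int × Int × String)), Dom_pick_target_bullet_py keywords targets → Spec_pick_target_bullet_py keywords targets (pick_target_bullet_py keywords targets)

-- ===== LEMMAS AND PROOFS =====

-- predicate counted by the hits helper
def pvHitP (low : String) (kw : String) : Bool :=
  let k := PySem.Str.lower (PySem.Str.strip kw)
  !decide (PySem.Str.len k < 2) && PySem.Str.isIn k low

theorem hits_foldl_acc (low : String) (kws : List String) : ∀ (n : Int),
    kws.foldl (fun n kw =>
      let k := PySem.Str.lower (PySem.Str.strip kw)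
      if PySem.Str.len k < 2 then n
      else if PySem.Str.isIn k low then n + 1 else n) n = n + (kws.countP (pvHitP low) : Int) := by
  induction kws with
  | nil => simp
  | cons kw kws ih =>
    intro n
    simp only [List.foldl_cons, List.countP_cons, ih, pvHitP]
    split_ifs with h1 h2 <;> simp_all
    ring

theorem hits_eq_countP (kws : List String) (low : String) :
    bullet_keyword_hits kws low = (kws.countP (pvHitP low) : Int) := by
  unfold bullet_keyword_hits
  simpa using hits_foldl_acc low kws 0

theorem hits_nonneg (kws : List String) (low : String) : 0 ≤ bullet_keyword_hits kws low := by
  rw [hits_eq_countP]; positivity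

theorem hits_sorted_eq (keywords : List String) (low : String) :
    bullet_keyword_hits (PySem.List.sorted keywords (fun x => -(PySem.Str.len (PySem.Str.strip x))) false) low
      = bullet_keyword_hits keywords low := by
  have h := (PySem.List.sorted_perm keywords (fun x => -(PySem.Str.len (PySem.Str.strip x))) false).countP_eq (pvHitP low)
  rw [hits_eq_countP, hits_eq_countP, h]

-- first-minimum selection fold (keep-first on ties)
def pvSel {α : Type} (lt : α → α → Bool) (xs : List α) (b : Option α) : Option α :=
  xs.foldl (fun b x => match b with
    | none => some x
    | some y => if lt x y then some x else some y) b

theorem pvSel_cons_none {α : Type} (lt : α → α → Bool) (x : α) (xs : List α) :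
    pvSel lt (x :: xs) none = pvSel lt xs (some x) := rfl
theorem pvSel_cons_some {α : Type} (lt : α → α → Bool) (x y : α) (xs : List α) :
    pvSel lt (x :: xs) (some y) = pvSel lt xs (if lt x y then some x else some y) := rfl

-- head of the stable-insertion-sort fold is the first-minimum fold
theorem head_foldl_insertBy {α : Type} (bf : α → α → Bool) (xs : List α) : ∀ (acc : List α),
    (xs.foldl (fun a x => PySem.List.insertBy bf x a) acc).head? = pvSel bf xs acc.head? := by
  induction xs with
  | nil => intro acc; simp [pvSel]
  | cons x xs ih =>
    intro acc
    have hstep : (PySem.List.insertBy bf x acc).head? =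
        (match acc.head? with | none => some x | some y => if bf x y then some x else some y) := by
      cases acc with
      | nil => simp [PySem.List.insertBy]
      | cons y t => cases h : bf x y <;> simp [PySem.List.insertBy, h]
    rw [List.foldl_cons, ih, hstep]
    rfl

theorem pvSel_map {α β : Type} (lt : β → β → Bool) (f : α → β) (xs : List α) : ∀ (b : Option α),
    pvSel lt (xs.map f) (b.map f) = (pvSel (fun x y => lt (f x) (f y)) xs b).map f := by
  induction xs with
  | nil => intro b; simp [pvSel]
  | cons x xs ih =>
    intro b
    simp only [List.map_cons, pvSel, List.foldl_cons] at *
    cases b with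
    | none => exact ih (some x)
    | some y => simp only [Option.map_some]; split_ifs <;> [exact ih (some x); exact ih (some y)]

-- per-target key functions (proof-side abbreviations)
def pvH (kws : List String) (t : String × Int × Int × String) : Int :=
  bullet_keyword_hits kws (PySem.Str.lower t.2.2.2)
def pvP (t : String × Int × Int × String) : Int × Int × Int :=
  ((if t.1 = "experience" then 0 else 1), t.2.1, t.2.2.1)
def pvK (kws : List String) (t : String × Int × Int × String) : Int × Int × Int × Int × Int :=
  ((if pvH kws t == 0 then 1 else 0), pvH kws t, pvP t)

def lt5T (kws : List String) (x y : String × Int × Int × String) : Bool := pvKeyLt (pvK kws x) (pvK kws y)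
def lt4T (kws : List String) (x y : String × Int × Int × String) : Bool := pvLt4 (pvH kws x, pvP x) (pvH kws y, pvP y)
def lt3T (x y : String × Int × Int × String) : Bool := pvLt3 (pvP x) (pvP y)

theorem lt5_zero_zero (kws : List String) (x y : String × Int × Int × String)
    (hx : pvH kws x = 0) (hy : pvH kws y = 0) : lt5T kws x y = lt3T x y := by
  simp [lt5T, lt3T, pvK, pvKeyLt, pvLt3, hx, hy]

theorem lt5_pos_pos (kws : List String) (x y : String × Int × Int × String)
    (hx : 0 < pvH kws x) (hy : 0 < pvH kws y) : lt5T kws x y = lt4T kws x y := by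
  simp [lt5T, lt4T, pvK, pvKeyLt, pvLt4, pvLt3, hx.ne', hy.ne']

theorem lt5_zero_pos (kws : List String) (x y : String × Int × Int × String)
    (hx : pvH kws x = 0) (hy : 0 < pvH kws y) : lt5T kws x y = false := by
  simp [lt5T, pvK, pvKeyLt, hx, hy.ne']

theorem lt5_pos_zero (kws : List String) (x y : String × Int × Int × String)
    (hx : 0 < pvH kws x) (hy : pvH kws y = 0) : lt5T kws x y = true := by
  simp [lt5T, pvK, pvKeyLt, hy, hx.ne']

theorem sel_all_zero (kws : List String) (xs : List (String × Int × Int × String)) :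
    ∀ (b : Option (String × Int × Int × String)),
      (∀ t ∈ xs, pvH kws t = 0) → (∀ m, b = some m → pvH kws m = 0) →
      pvSel (lt5T kws) xs b = pvSel lt3T xs b := by
  induction xs with
  | nil => intro b _ _; rfl
  | cons x xs ih =>
    intro b hz hb
    have hx : pvH kws x = 0 := hz x (by simp)
    cases b with
    | none =>
      rw [pvSel_cons_none, pvSel_cons_none]
      exact ih (some x) (fun t ht => hz t (List.mem_cons_of_mem _ ht))
        (fun m hm => by cases hm; exact hx)
    | some m =>
      have hm : pvH kws m = 0 := hb m rfl
      rw [pvSel_cons_some, pvSel_cons_some, lt5_zero_zero kws x m hx hm]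
      split_ifs with h
      · exact ih (some x) (fun t ht => hz t (List.mem_cons_of_mem _ ht))
          (fun m' hm' => by cases hm'; exact hx)
      · exact ih (some m) (fun t ht => hz t (List.mem_cons_of_mem _ ht))
          (fun m' hm' => by cases hm'; exact hm)

theorem sel_pos_acc (kws : List String) (xs : List (String × Int × Int × String)) :
    ∀ (b : String × Int × Int × String), 0 < pvH kws b →
      pvSel (lt5T kws) xs (some b) = pvSel (lt4T kws) (xs.filter (fun t => decide (0 < pvH kws t))) (some b) := by
  induction xs with
  | nil => intro b _; rfl
  | cons x xs ih =>
    intro b hbpos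
    by_cases hx : 0 < pvH kws x
    · simp only [List.filter_cons, decide_eq_true_eq, if_pos hx]
      rw [pvSel_cons_some, pvSel_cons_some, lt5_pos_pos kws x b hx hbpos]
      split_ifs with h
      · exact ih x hx
      · exact ih b hbpos
    · have hx0 : pvH kws x = 0 := by have := hits_nonneg kws (PySem.Str.lower x.2.2.2); unfold pvH at *; omega
      simp only [List.filter_cons, decide_eq_true_eq, if_neg hx]
      rw [pvSel_cons_some, lt5_zero_pos kws x b hx0 hbpos]
      simp only [Bool.false_eq_true, if_false]
      exact ih b hbpos

theorem sel_unify (kws : List String) (xs : List (String × Int × Int × String)) :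
    ∀ (b : Option (String × Int × Int × String)), (∀ m, b = some m → pvH kws m = 0) →
      (xs.filter (fun t => decide (0 < pvH kws t))) ≠ [] →
      pvSel (lt5T kws) xs b = pvSel (lt4T kws) (xs.filter (fun t => decide (0 < pvH kws t))) none := by
  induction xs with
  | nil => intro b _ h; exact absurd rfl h
  | cons x xs ih =>
    intro b hb hne
    by_cases hx : 0 < pvH kws x
    · simp only [List.filter_cons, decide_eq_true_eq, if_pos hx]
      have hL : pvSel (lt5T kws) (x :: xs) b = pvSel (lt5T kws) xs (some x) := by
        cases b with
        | none => rw [pvSel_cons_none]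
        | some m => rw [pvSel_cons_some, lt5_pos_zero kws x m hx (hb m rfl)]; rfl
      rw [hL, pvSel_cons_none]
      exact sel_pos_acc kws xs x hx
    · have hx0 : pvH kws x = 0 := by have := hits_nonneg kws (PySem.Str.lower x.2.2.2); unfold pvH at *; omega
      have hne' : xs.filter (fun t => decide (0 < pvH kws t)) ≠ [] := by
        simpa [List.filter_cons, hx] using hne
      simp only [List.filter_cons, decide_eq_true_eq, if_neg hx]
      cases b with
      | none =>
        rw [pvSel_cons_none]
        exact ih (some x) (fun m hm => by cases hm; exact hx0) hne'
      | some m =>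
        have hm : pvH kws m = 0 := hb m rfl
        rw [pvSel_cons_some, lt5_zero_zero kws x m hx0 hm]
        split_ifs with h
        · exact ih (some x) (fun m' hm' => by cases hm'; exact hx0) hne'
        · exact ih (some m) (fun m' hm' => by cases hm'; exact hm) hne'

theorem selA4 (kws : List String) (l : List (String × Int × Int × String)) :
    (pvSel (fun a b => pvLt4 (a.1, a.2.1) (b.1, b.2.1))
        (l.map (fun t => (pvH kws t, pvP t, t))) none).map (fun x => x.2.2)
      = pvSel (lt4T kws) l none := by
  rw [show (none : Option (Int × (Int × Int × Int) × (String × Int × Int × String)))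
        = Option.map (fun t => (pvH kws t, pvP t, t)) none from rfl,
      pvSel_map, Option.map_map]
  rw [show ((fun (x : Int × (Int × Int × Int) × (String × Int × Int × String)) => x.2.2)
        ∘ (fun t => (pvH kws t, pvP t, t))) = id from rfl, Option.map_id]
  rfl

theorem selA3 (kws : List String) (l : List (String × Int × Int × String)) :
    (pvSel (fun a b => pvLt3 a.2.1 b.2.1)
        (l.map (fun t => (pvH kws t, pvP t, t))) none).map (fun x => x.2.2)
      = pvSel lt3T l none := by
  rw [show (none : Option (Int × (Int × Int × Int) × (String × Int × Int × String)))
        = Option.map (fun t => (pvH kws t, pvP t, t)) none from rfl,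
      pvSel_map, Option.map_map]
  rw [show ((fun (x : Int × (Int × Int × Int) × (String × Int × Int × String)) => x.2.2)
        ∘ (fun t => (pvH kws t, pvP t, t))) = id from rfl, Option.map_id]
  rfl

theorem branchA4 (kws : List String) (l : List (String × Int × Int × String)) :
    (match (List.foldl (fun acc x => PySem.List.insertBy (fun a b => pvLt4 (a.1, a.2.1) (b.1, b.2.1)) x acc) []
        (l.map (fun t => (pvH kws t, pvP t, t))) : List (Int × (Int × Int × Int) × (String × Int × Int × String))) with
      | [] => (none : Option (String × Int × Int × String))
      | x :: _ => some x.2.2)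
    = pvSel (lt4T kws) l none := by
  have h := head_foldl_insertBy (fun a b => pvLt4 (a.1, a.2.1) (b.1, b.2.1))
      (l.map (fun t => (pvH kws t, pvP t, t))) []
  simp only [List.head?_nil] at h
  rw [← selA4 kws l, ← h]
  cases hF : (List.foldl (fun acc x => PySem.List.insertBy (fun a b => pvLt4 (a.1, a.2.1) (b.1, b.2.1)) x acc) []
      (l.map (fun t => (pvH kws t, pvP t, t)))) <;> rfl

theorem branchA3 (kws : List String) (l : List (String × Int × Int × String)) :
    (match (List.foldl (fun acc x => PySem.List.insertBy (fun a b => pvLt3 a.2.1 b.2.1) x acc) []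
        (l.map (fun t => (pvH kws t, pvP t, t))) : List (Int × (Int × Int × Int) × (String × Int × Int × String))) with
      | [] => (none : Option (String × Int × Int × String))
      | x :: _ => some x.2.2)
    = pvSel lt3T l none := by
  have h := head_foldl_insertBy (fun a b => pvLt3 a.2.1 b.2.1)
      (l.map (fun t => (pvH kws t, pvP t, t))) []
  simp only [List.head?_nil] at h
  rw [← selA3 kws l, ← h]
  cases hF : (List.foldl (fun acc x => PySem.List.insertBy (fun a b => pvLt3 a.2.1 b.2.1) x acc) []
      (l.map (fun t => (pvH kws t, pvP t, t)))) <;> rfl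

def pvG (kws : List String) (t : String × Int × Int × String) :
    (Int × Int × Int × Int × Int) × (String × Int × Int × String) := (pvK kws t, t)

def pvBStep (kws : List String)
    (best : Option ((Int × Int × Int × Int × Int) × (String × Int × Int × String)))
    (t : String × Int × Int × String) :
    Option ((Int × Int × Int × Int × Int) × (String × Int × Int × String)) :=
  let hits := bullet_keyword_hits kws (PySem.Str.lower t.2.2.2)
  let key : Int × Int × Int × Int × Int :=
    ((if hits == 0 then 1 else 0), hits, (if t.1 = "experience" then 0 else 1), t.2.1, t.2.2.1)
  match best with
  | none => some (key, t)
  | some b => if pvKeyLt key b.1 then some (key, t) else some b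

theorem selB_pair (kws : List String) (xs : List (String × Int × Int × String)) :
    ∀ (b : Option (String × Int × Int × String)),
      xs.foldl (pvBStep kws) (b.map (pvG kws)) = (pvSel (lt5T kws) xs b).map (pvG kws) := by
  induction xs with
  | nil => intro b; rfl
  | cons x xs ih =>
    intro b
    cases b with
    | none =>
      rw [List.foldl_cons, pvSel_cons_none]
      rw [show pvBStep kws (Option.map (pvG kws) none) x = Option.map (pvG kws) (some x) from rfl]
      exact ih (some x)
    | some m =>
      rw [List.foldl_cons, pvSel_cons_some]
      rw [show pvBStep kws (Option.map (pvG kws) (some m)) x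
            = Option.map (pvG kws) (if lt5T kws x m then some x else some m) from by
        cases h : lt5T kws x m
        · rw [show pvBStep kws (Option.map (pvG kws) (some m)) x
              = if lt5T kws x m then some (pvG kws x) else some (pvG kws m) from rfl, h]; rfl
        · rw [show pvBStep kws (Option.map (pvG kws) (some m)) x
              = if lt5T kws x m then some (pvG kws x) else some (pvG kws m) from rfl, h]; rfl]
      exact ih (if lt5T kws x m then some x else some m)

theorem portA_eq (keywords : List String) (targets : List (String × Int × Int × String)) :
    pick_target_bullet_py keywords targets =
      if targets.isEmpty then none
      else if (targets.filter (fun t => decide (0 < pvH keywords t))).isEmpty then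
        pvSel lt3T targets none
      else pvSel (lt4T keywords) (targets.filter (fun t => decide (0 < pvH keywords t))) none := by
  unfold pick_target_bullet_py
  by_cases ht : targets.isEmpty
  · simp [ht]
  · simp only [ht, Bool.false_eq_true, if_false]
    simp only [hits_sorted_eq]
    rw [List.filter_map]
    rw [show ((fun (x : Int × (Int × Int × Int) × (String × Int × Int × String)) => decide (0 < x.1))
          ∘ (fun t => (bullet_keyword_hits keywords (PySem.Str.lower t.2.2.2),
              ((if t.1 = "experience" then (0 : Int) else 1), t.2.1, t.2.2.1), t)))
        = (fun t => decide (0 < pvH keywords t)) from rfl]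
    simp only [List.isEmpty_map]
    by_cases hp : (targets.filter (fun t => decide (0 < pvH keywords t))).isEmpty
    · simp only [hp, Bool.not_true, Bool.false_eq_true, if_false, if_true]
      exact branchA3 keywords targets
    · simp only [Bool.not_eq_true] at hp
      simp only [hp, Bool.not_false, Bool.false_eq_true, if_false, if_true]
      exact branchA4 keywords (targets.filter (fun t => decide (0 < pvH keywords t)))

theorem portB_eq (keywords : List String) (targets : List (String × Int × Int × String)) :
    pick_target_bullet_py_alt keywords targets =
      if targets.isEmpty then none else pvSel (lt5T keywords) targets none := by
  unfold pick_target_bullet_py_alt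
  by_cases ht : targets.isEmpty
  · simp [ht]
  · simp only [ht, Bool.false_eq_true, if_false]
    have h := selB_pair keywords targets none
    calc (targets.foldl (pvBStep keywords) none).map (fun x => x.2)
        = ((pvSel (lt5T keywords) targets none).map (pvG keywords)).map (fun x => x.2) := by
          rw [show (none : Option ((Int × Int × Int × Int × Int) × (String × Int × Int × String)))
                = Option.map (pvG keywords) none from rfl, h]
      _ = pvSel (lt5T keywords) targets none := by
          rw [Option.map_map,
            show ((fun (x : (Int × Int × Int × Int × Int) × (String × Int × Int × String)) => x.2)
              ∘ pvG keywords) = id from rfl, Option.map_id]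
          rfl

-- ===== VERDICT (by name: the statement is the Claim_ definition above) =====
theorem pick_target_bullet_py_spec : Claim_equal_pick_target_bullet_py := by
  unfold Claim_equal_pick_target_bullet_py
  intro keywords targets _
  unfold Spec_pick_target_bullet_py
  rw [portA_eq, portB_eq]
  by_cases ht : targets.isEmpty
  · simp [ht]
  · simp only [ht, Bool.false_eq_true, if_false]
    by_cases hp : (targets.filter (fun t => decide (0 < pvH keywords t))).isEmpty
    · simp only [hp, if_true]
      have hz : ∀ t ∈ targets, pvH keywords t = 0 := by
        intro t htm
        have hnp : ¬ (0 < pvH keywords t) := by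
          intro hpos
          have hmem : t ∈ targets.filter (fun t => decide (0 < pvH keywords t)) :=
            List.mem_filter.2 ⟨htm, by simpa using hpos⟩
          rw [List.isEmpty_iff] at hp
          simp [hp] at hmem
        have := hits_nonneg keywords (PySem.Str.lower t.2.2.2)
        unfold pvH at *; omega
      exact (sel_all_zero keywords targets none hz (fun m hm => by cases hm)).symm
    · simp only [hp, Bool.false_eq_true, if_false]
      refine (sel_unify keywords targets none (fun m hm => by cases hm) ?_).symm
      intro h
      exact hp (by simp [h])
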